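-- pv_equiv track=rewrite | github.com/daniees45/daniees | load_data.py | get_department_group
-- ===== SOURCE A (Python) =====
-- def get_department_group(course_code: str) -> str:
--     """Categorize course into department groups based on prefix."""
--     code = str(course_code).upper()
--     # CS/IT/BIS Group
--     if any(prefix in code for prefix in ["COSC", "INFT", "BBIS", "CSCD"]):
--         return "CS"
--     # Nursing Group
--     if any(prefix in code for prefix in ["NURS", "RNSG", "MIDW"]):
--         return "Nursing"
--     # Theology Group
--     if any(prefix in code for prefix in ["RELB", "RELT", "PEAC"]):
--         return "Theology"
--     return "Other"
-- ===== SOURCE B (Python) =====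
-- _RANK = {"COSC": 0, "INFT": 0, "BBIS": 0, "CSCD": 0,
--          "NURS": 1, "RNSG": 1, "MIDW": 1,
--          "RELB": 2, "RELT": 2, "PEAC": 2}
-- _NAMES = ["CS", "Nursing", "Theology", "Other"]
--
-- def get_department_group(course_code: str) -> str:
--     """Categorize course into department groups via one sliding-window scan:
--     every 4-char window is looked up in a rank dict; the minimum rank wins."""
--     code = str(course_code).upper()
--     best = 3
--     for i in range(len(code)):
--         best = min(best, _RANK.get(code[i:i+4], 3))
--     return _NAMES[best]
-- ===== Notes on version B (the rewrite author's own statement) =====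
-- stated objective: alternative
-- what changed: Replaced A's ten independent substring searches by one sliding-window pass over the uppercased code: each 4-char window is looked up once in a prefix-to-rank dict and the minimum rank seen selects the group name.
import Mathlib
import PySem

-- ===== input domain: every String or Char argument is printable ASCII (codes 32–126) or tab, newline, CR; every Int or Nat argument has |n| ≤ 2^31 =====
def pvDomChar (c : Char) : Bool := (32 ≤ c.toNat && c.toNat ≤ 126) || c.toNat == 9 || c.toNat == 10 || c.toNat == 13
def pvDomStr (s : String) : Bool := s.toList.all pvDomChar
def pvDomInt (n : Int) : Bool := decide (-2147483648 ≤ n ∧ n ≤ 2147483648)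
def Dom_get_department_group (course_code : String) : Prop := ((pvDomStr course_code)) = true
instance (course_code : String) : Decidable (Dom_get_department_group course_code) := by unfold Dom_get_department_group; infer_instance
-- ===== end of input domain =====

-- B replaces A's ten separate substring searches by ONE sliding-window pass over the uppercased
-- code: each 4-char window is looked up in a prefix→rank dict and the minimum rank picks the
-- group name (objective: alternative). Return value only; neither version has side effects.

-- ===== PORT A =====
def get_department_group (course_code : String) : String :=
  let code := PySem.Str.upper course_code
  if ["COSC", "INFT", "BBIS", "CSCD"].any (fun prefix_ => PySem.Str.isIn prefix_ code) then "CS"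
  else if ["NURS", "RNSG", "MIDW"].any (fun prefix_ => PySem.Str.isIn prefix_ code) then "Nursing"
  else if ["RELB", "RELT", "PEAC"].any (fun prefix_ => PySem.Str.isIn prefix_ code) then "Theology"
  else "Other"

-- ===== PORT B =====
-- _RANK.get(window, 3): the dict lookup on the ten 4-char keys, ported as its exact case analysis
def pvRank (w : List Char) : Nat :=
  if w = "COSC".toList ∨ w = "INFT".toList ∨ w = "BBIS".toList ∨ w = "CSCD".toList then 0
  else if w = "NURS".toList ∨ w = "RNSG".toList ∨ w = "MIDW".toList then 1
  else if w = "RELB".toList ∨ w = "RELT".toList ∨ w = "PEAC".toList then 2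
  else 3

-- the for-loop of Source B: at each position look at the 4-char window and keep the minimum rank seen
def pvScan : List Char → Nat → Nat
  | [], best => best
  | c :: rest, best => pvScan rest (min best (pvRank ((c :: rest).take 4)))

def pvNames : List String := ["CS", "Nursing", "Theology", "Other"]

def get_department_group_alt (course_code : String) : String :=
  pvNames.getD (pvScan (PySem.Str.upper course_code).toList 3) "Other"

-- ===== PRECONDITION & SPEC =====
def Spec_get_department_group (course_code : String) (out : String) : Prop := out = get_department_group_alt course_code
instance (course_code : String) (out : String) : Decidable (Spec_get_department_group course_code out) := by unfold Spec_get_department_group; infer_instance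

-- ===== CLAIM (what is proved, stated in full; the proofs are below) =====
def Claim_equal_get_department_group : Prop := ∀ (course_code : String), Dom_get_department_group course_code → Spec_get_department_group course_code (get_department_group course_code)

-- ===== LEMMAS AND PROOFS =====

theorem pvRank_le_three (w : List Char) : pvRank w ≤ 3 := by
  unfold pvRank; split_ifs <;> omega

theorem pvScan_le (cs : List Char) (b : Nat) : pvScan cs b ≤ b := by
  induction cs generalizing b with
  | nil => simp [pvScan]
  | cons c rest ih =>
      calc pvScan (c :: rest) b ≤ min b (pvRank ((c :: rest).take 4)) := ih _
        _ ≤ b := Nat.min_le_left _ _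

theorem pvScan_min (cs : List Char) (b : Nat) (hb : b ≤ 3) :
    pvScan cs b = min b (pvScan cs 3) := by
  induction cs generalizing b with
  | nil => simp [pvScan]; omega
  | cons c rest ih =>
      have hr := pvRank_le_three ((c :: rest).take 4)
      have h1 := ih (min b (pvRank ((c :: rest).take 4))) (by omega)
      have h2 := ih (min 3 (pvRank ((c :: rest).take 4))) (by omega)
      show pvScan rest (min b (pvRank ((c :: rest).take 4)))
        = min b (pvScan rest (min 3 (pvRank ((c :: rest).take 4))))
      rw [h1, h2]
      omega

theorem pvScan_le_iff (cs : List Char) (r : Nat) (hr : r < 3) :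
    pvScan cs 3 ≤ r ↔ ∃ j, pvRank ((cs.drop j).take 4) ≤ r := by
  induction cs with
  | nil =>
      constructor
      · intro h; simp [pvScan] at h; omega
      · rintro ⟨j, hj⟩
        simp only [List.drop_nil, List.take_nil] at hj
        have : pvRank ([] : List Char) = 3 := by decide
        omega
  | cons c rest ih =>
      have hstep : pvScan (c :: rest) 3 = min (pvRank ((c :: rest).take 4)) (pvScan rest 3) := by
        show pvScan rest (min 3 (pvRank ((c :: rest).take 4))) = _
        rw [pvScan_min rest _ (by have := pvRank_le_three ((c :: rest).take 4); omega)]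
        have := pvRank_le_three ((c :: rest).take 4)
        omega
      rw [hstep]
      constructor
      · intro h
        rcases min_le_iff.mp h with h' | h'
        · exact ⟨0, by simpa using h'⟩
        · obtain ⟨j, hj⟩ := ih.mp h'
          exact ⟨j + 1, by simpa using hj⟩
      · rintro ⟨j, hj⟩
        rcases j with _ | j
        · exact le_trans (Nat.min_le_left _ _) (by simpa using hj)
        · exact le_trans (Nat.min_le_right _ _) (ih.mpr ⟨j, by simpa using hj⟩)

-- a 4-char pattern occurs as some window iff it is an infix (Python's 'p in code')
theorem window_iff_infix (p : List Char) (hp : p.length = 4) (cs : List Char) :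
    (∃ j, (cs.drop j).take 4 = p) ↔ p <:+: cs := by
  rw [← PySem.Chars.isIn_iff_infix, ← PySem.Chars.exists_prefix_drop_iff_isIn]
  constructor
  · rintro ⟨j, h⟩
    exact ⟨j, h ▸ List.take_prefix 4 (cs.drop j)⟩
  · rintro ⟨j, h⟩
    refine ⟨j, ?_⟩
    rw [List.prefix_iff_eq_take] at h
    rw [hp] at h
    exact h.symm

theorem scan_le_zero_iff (cs : List Char) :
    pvScan cs 3 ≤ 0 ↔ ("COSC".toList <:+: cs ∨ "INFT".toList <:+: cs ∨
      "BBIS".toList <:+: cs ∨ "CSCD".toList <:+: cs) := by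
  rw [pvScan_le_iff cs 0 (by omega)]
  have hrank : ∀ w : List Char, pvRank w ≤ 0 ↔
      (w = "COSC".toList ∨ w = "INFT".toList ∨ w = "BBIS".toList ∨ w = "CSCD".toList) := by
    intro w; unfold pvRank; split_ifs with h1 h2 h3 <;> simp_all
  simp only [hrank, exists_or]
  rw [window_iff_infix _ (by decide), window_iff_infix _ (by decide),
      window_iff_infix _ (by decide), window_iff_infix _ (by decide)]

theorem scan_le_one_iff (cs : List Char) :
    pvScan cs 3 ≤ 1 ↔ (("COSC".toList <:+: cs ∨ "INFT".toList <:+: cs ∨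
      "BBIS".toList <:+: cs ∨ "CSCD".toList <:+: cs) ∨
      ("NURS".toList <:+: cs ∨ "RNSG".toList <:+: cs ∨ "MIDW".toList <:+: cs)) := by
  rw [pvScan_le_iff cs 1 (by omega)]
  have hrank : ∀ w : List Char, pvRank w ≤ 1 ↔
      ((w = "COSC".toList ∨ w = "INFT".toList ∨ w = "BBIS".toList ∨ w = "CSCD".toList) ∨
       (w = "NURS".toList ∨ w = "RNSG".toList ∨ w = "MIDW".toList)) := by
    intro w; unfold pvRank; split_ifs with h1 h2 h3 <;> simp_all
  simp only [hrank, exists_or]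
  rw [window_iff_infix _ (by decide), window_iff_infix _ (by decide), window_iff_infix _ (by decide),
      window_iff_infix _ (by decide), window_iff_infix _ (by decide), window_iff_infix _ (by decide),
      window_iff_infix _ (by decide)]

theorem scan_le_two_iff (cs : List Char) :
    pvScan cs 3 ≤ 2 ↔ ((("COSC".toList <:+: cs ∨ "INFT".toList <:+: cs ∨
      "BBIS".toList <:+: cs ∨ "CSCD".toList <:+: cs) ∨
      ("NURS".toList <:+: cs ∨ "RNSG".toList <:+: cs ∨ "MIDW".toList <:+: cs)) ∨
      ("RELB".toList <:+: cs ∨ "RELT".toList <:+: cs ∨ "PEAC".toList <:+: cs)) := by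
  rw [pvScan_le_iff cs 2 (by omega)]
  have hrank : ∀ w : List Char, pvRank w ≤ 2 ↔
      (((w = "COSC".toList ∨ w = "INFT".toList ∨ w = "BBIS".toList ∨ w = "CSCD".toList) ∨
       (w = "NURS".toList ∨ w = "RNSG".toList ∨ w = "MIDW".toList)) ∨
       (w = "RELB".toList ∨ w = "RELT".toList ∨ w = "PEAC".toList)) := by
    intro w; unfold pvRank; split_ifs with h1 h2 h3 <;> simp_all
  simp only [hrank, exists_or]
  rw [window_iff_infix _ (by decide), window_iff_infix _ (by decide), window_iff_infix _ (by decide),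
      window_iff_infix _ (by decide), window_iff_infix _ (by decide), window_iff_infix _ (by decide),
      window_iff_infix _ (by decide), window_iff_infix _ (by decide), window_iff_infix _ (by decide),
      window_iff_infix _ (by decide)]

-- the two programs agree for an arbitrary (already uppercased) code string
theorem pv_key (code : String) :
    (if ["COSC", "INFT", "BBIS", "CSCD"].any (fun prefix_ => PySem.Str.isIn prefix_ code) then "CS"
     else if ["NURS", "RNSG", "MIDW"].any (fun prefix_ => PySem.Str.isIn prefix_ code) then "Nursing"
     else if ["RELB", "RELT", "PEAC"].any (fun prefix_ => PySem.Str.isIn prefix_ code) then "Theology"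
     else "Other")
    = pvNames.getD (pvScan code.toList 3) "Other" := by
  have c1 : ((["COSC", "INFT", "BBIS", "CSCD"].any fun prefix_ => PySem.Str.isIn prefix_ code) = true)
      ↔ ("COSC".toList <:+: code.toList ∨ "INFT".toList <:+: code.toList ∨
         "BBIS".toList <:+: code.toList ∨ "CSCD".toList <:+: code.toList) := by
    simp only [List.any_cons, List.any_nil, Bool.or_eq_true, Bool.or_false,
      PySem.Str.isIn_eq, PySem.Chars.isIn_iff_infix]
  have c2 : ((["NURS", "RNSG", "MIDW"].any fun prefix_ => PySem.Str.isIn prefix_ code) = true)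
      ↔ ("NURS".toList <:+: code.toList ∨ "RNSG".toList <:+: code.toList ∨
         "MIDW".toList <:+: code.toList) := by
    simp only [List.any_cons, List.any_nil, Bool.or_eq_true, Bool.or_false,
      PySem.Str.isIn_eq, PySem.Chars.isIn_iff_infix]
  have c3 : ((["RELB", "RELT", "PEAC"].any fun prefix_ => PySem.Str.isIn prefix_ code) = true)
      ↔ ("RELB".toList <:+: code.toList ∨ "RELT".toList <:+: code.toList ∨
         "PEAC".toList <:+: code.toList) := by
    simp only [List.any_cons, List.any_nil, Bool.or_eq_true, Bool.or_false,
      PySem.Str.isIn_eq, PySem.Chars.isIn_iff_infix]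
  by_cases h0 : pvScan code.toList 3 ≤ 0
  · rw [if_pos (c1.mpr ((scan_le_zero_iff _).mp h0))]
    have hm : pvScan code.toList 3 = 0 := by omega
    rw [hm]; rfl
  · have hn1 : ¬ ((["COSC", "INFT", "BBIS", "CSCD"].any fun prefix_ => PySem.Str.isIn prefix_ code) = true) :=
      fun h => h0 ((scan_le_zero_iff _).mpr (c1.mp h))
    by_cases h1 : pvScan code.toList 3 ≤ 1
    · have hd := ((scan_le_one_iff _).mp h1).resolve_left (fun h => h0 ((scan_le_zero_iff _).mpr h))
      rw [if_neg hn1, if_pos (c2.mpr hd)]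
      have hm : pvScan code.toList 3 = 1 := by omega
      rw [hm]; rfl
    · have hn2 : ¬ ((["NURS", "RNSG", "MIDW"].any fun prefix_ => PySem.Str.isIn prefix_ code) = true) :=
        fun h => h1 ((scan_le_one_iff _).mpr (Or.inr (c2.mp h)))
      by_cases h2 : pvScan code.toList 3 ≤ 2
      · have hd := ((scan_le_two_iff _).mp h2).resolve_left (fun h => h1 ((scan_le_one_iff _).mpr h))
        rw [if_neg hn1, if_neg hn2, if_pos (c3.mpr hd)]
        have hm : pvScan code.toList 3 = 2 := by omega
        rw [hm]; rfl
      · have hn3 : ¬ ((["RELB", "RELT", "PEAC"].any fun prefix_ => PySem.Str.isIn prefix_ code) = true) :=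
          fun h => h2 ((scan_le_two_iff _).mpr (Or.inr (c3.mp h)))
        rw [if_neg hn1, if_neg hn2, if_neg hn3]
        have hm : pvScan code.toList 3 = 3 := by
          have := pvScan_le code.toList 3; omega
        rw [hm]; rfl

-- ===== VERDICT (by name: the statement is the Claim_ definition above) =====
theorem get_department_group_spec : Claim_equal_get_department_group := by
  intro s _
  unfold Spec_get_department_group get_department_group get_department_group_alt
  exact pv_key (PySem.Str.upper s)
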